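-- pv_equiv track=rewrite | github.com/DominikaBarrett/embroidery-python | embroidery.py | draw_rectangle
-- ===== SOURCE A (Python) =====
-- def draw_rectangle(width, height, border_width=1, border_color=1, fill_color=1):
--     matrix = []
--
--     for i in range(height):
--         row = []
--
--         if i < border_width or i >= height - border_width:
--             for j in range(width):
--                 row.append(border_color)
--             matrix.append(row)
--         else:
--             for j in range(width):
--                 if j < border_width or j >= width - border_width:
--                     row.append(border_color)
--                 else:
--                     row.append(fill_color)
--             matrix.append(row)
--
--     return matrix
-- ===== SOURCE B (Python) =====
-- def draw_rectangle(width, height, border_width=1, border_color=1, fill_color=1):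
--     w = max(width, 0)
--     h = max(height, 0)
--     if h == 0:
--         return []
--     bw = max(border_width, 0)
--     full = [border_color] * w
--     interior = max(h - 2 * bw, 0)
--     top = min(bw, h)
--     bottom = h - top - interior
--     if interior and 2 * bw < w:
--         mid = [border_color] * bw + [fill_color] * (w - 2 * bw) + [border_color] * bw
--     else:
--         mid = full
--     return ([full[:] for _ in range(top)]
--             + [mid[:] for _ in range(interior)]
--             + [full[:] for _ in range(bottom)])
-- ===== Notes on version B (the rewrite author's own statement) =====
-- stated objective: alternative
-- what changed: A classifies every row and appends cell by cell in nested Python loops; B computes the three row templates (full border row, interior row) and the top/interior/bottom row counts in closed form and builds the matrix by list replication and concatenation, with no per-cell loop.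
import Mathlib
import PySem

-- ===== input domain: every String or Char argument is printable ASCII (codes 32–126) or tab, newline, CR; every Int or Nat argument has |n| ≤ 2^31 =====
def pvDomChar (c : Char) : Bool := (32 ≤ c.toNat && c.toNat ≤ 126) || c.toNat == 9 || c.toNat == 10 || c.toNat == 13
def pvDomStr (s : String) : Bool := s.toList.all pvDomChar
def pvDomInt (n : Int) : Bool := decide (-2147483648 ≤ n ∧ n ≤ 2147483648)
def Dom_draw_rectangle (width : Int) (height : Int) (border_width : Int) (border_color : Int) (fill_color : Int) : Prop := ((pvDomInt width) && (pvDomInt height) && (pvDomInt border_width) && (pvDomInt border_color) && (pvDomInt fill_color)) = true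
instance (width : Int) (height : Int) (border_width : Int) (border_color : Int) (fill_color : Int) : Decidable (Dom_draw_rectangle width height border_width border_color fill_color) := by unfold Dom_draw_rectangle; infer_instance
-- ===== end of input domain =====

-- B replaces A's nested per-cell loops by a closed-form build from replicated row
-- templates and row counts (a different construction of the same matrix).


-- ===== PORT A =====
def draw_rectangle (width : Int) (height : Int) (border_width : Int) (border_color : Int) (fill_color : Int) : List (List Int) :=
  (PySem.List.pyRange 0 height 1).foldl (fun matrix i =>
    if i < border_width ∨ i ≥ height - border_width then
      matrix ++ [(PySem.List.pyRange 0 width 1).foldl (fun row _ => row ++ [border_color]) []]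
    else
      matrix ++ [(PySem.List.pyRange 0 width 1).foldl (fun row j =>
        if j < border_width ∨ j ≥ width - border_width then row ++ [border_color]
        else row ++ [fill_color]) []]) []

-- ===== PORT B =====
def draw_rectangle_alt (width : Int) (height : Int) (border_width : Int) (border_color : Int) (fill_color : Int) : List (List Int) :=
  let w := max width 0
  let h := max height 0
  if h = 0 then [] else
  let bw := max border_width 0
  let full := List.replicate w.toNat border_color
  let interior := (max (h - 2 * bw) 0).toNat
  let top := (min bw h).toNat
  let bottom := (h - min bw h - max (h - 2 * bw) 0).toNat
  let mid := if 0 < interior ∧ 2 * bw < w then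
      List.replicate bw.toNat border_color ++ List.replicate (w - 2 * bw).toNat fill_color
        ++ List.replicate bw.toNat border_color
    else full
  List.replicate top full ++ List.replicate interior mid ++ List.replicate bottom full

-- ===== PRECONDITION & SPEC =====
def Spec_draw_rectangle (width : Int) (height : Int) (border_width : Int) (border_color : Int) (fill_color : Int) (out : List (List Int)) : Prop := out = draw_rectangle_alt width height border_width border_color fill_color
instance (width : Int) (height : Int) (border_width : Int) (border_color : Int) (fill_color : Int) (out : List (List Int)) : Decidable (Spec_draw_rectangle width height border_width border_color fill_color out) := by unfold Spec_draw_rectangle; infer_instance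

-- ===== CLAIM (what is proved, stated in full; the proofs are below) =====
def Claim_equal_draw_rectangle : Prop := ∀ (width : Int) (height : Int) (border_width : Int) (border_color : Int) (fill_color : Int), Dom_draw_rectangle width height border_width border_color fill_color → Spec_draw_rectangle width height border_width border_color fill_color (draw_rectangle width height border_width border_color fill_color)

-- ===== LEMMAS AND PROOFS =====

-- an if-else whose two branches append different singletons, as one appended singleton
theorem foldl_ite_append {α β : Type} (l : List β) (p : β → Prop) [DecidablePred p]
    (f g : β → α) (acc : List α) :
    l.foldl (fun acc x => if p x then acc ++ [f x] else acc ++ [g x]) acc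
      = acc ++ l.map (fun x => if p x then f x else g x) := by
  have h : (fun (acc : List α) x => if p x then acc ++ [f x] else acc ++ [g x])
      = fun acc x => acc ++ [if p x then f x else g x] := by
    funext a x; split <;> rfl
  rw [h, PySem.List.foldl_append_singleton_eq_map]

-- A as a map over row indices of maps over column indices
theorem A_canon (width height border_width border_color fill_color : Int) :
    draw_rectangle width height border_width border_color fill_color
      = (List.range height.toNat).map (fun (i : Nat) =>
          if (((i : Nat) : Int) < border_width ∨ ((i : Nat) : Int) ≥ height - border_width) then
            (List.range width.toNat).map (fun (_ : Nat) => border_color)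
          else
            (List.range width.toNat).map (fun (j : Nat) =>
              if (((j : Nat) : Int) < border_width ∨ ((j : Nat) : Int) ≥ width - border_width) then border_color
              else fill_color)) := by
  unfold draw_rectangle
  rw [foldl_ite_append]
  simp [PySem.List.pyRange_one, foldl_ite_append,
    List.foldl_map, List.map_map, Function.comp]

-- a constant row is a replicate
theorem row_border (w bc : Int) :
    (List.range w.toNat).map (fun _ => bc) = List.replicate (max w 0).toNat bc := by
  have hl : w.toNat = (max w 0).toNat := by omega
  simp [List.map_const', hl]

-- interior row, wide case: left border ++ fill ++ right border
theorem row_interior_wide (w bw bc fc : Int) (h2 : 2 * max bw 0 < max w 0) :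
    (List.range w.toNat).map (fun (j : Nat) =>
        if (((j : Nat) : Int) < bw ∨ ((j : Nat) : Int) ≥ w - bw) then bc else fc)
      = List.replicate (max bw 0).toNat bc
          ++ List.replicate (max w 0 - 2 * max bw 0).toNat fc
          ++ List.replicate (max bw 0).toNat bc := by
  apply List.ext_getElem
  · simp; omega
  · intro j hj1 hj2
    simp only [List.getElem_map, List.getElem_range, List.getElem_append,
      List.getElem_range, List.length_replicate, List.length_append, List.getElem_replicate]
    have hjw : j < w.toNat := by simpa using hj1
    split_ifs <;> omega
-- (omega closes each branch: either the outer if-condition is decided by the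
--  position facts, or the position facts are contradictory)

-- interior row, narrow case: the border covers the whole row
theorem row_interior_narrow (w bw bc fc : Int) (h2 : ¬ 2 * max bw 0 < max w 0) :
    (List.range w.toNat).map (fun (j : Nat) =>
        if (((j : Nat) : Int) < bw ∨ ((j : Nat) : Int) ≥ w - bw) then bc else fc)
      = List.replicate (max w 0).toNat bc := by
  apply List.ext_getElem
  · simp; omega
  · intro j hj1 hj2
    simp only [List.getElem_map, List.getElem_range, List.getElem_replicate]
    have hjw : j < w.toNat := by simpa using hj1
    rw [if_pos (by omega : ((j : Nat) : Int) < bw ∨ ((j : Nat) : Int) ≥ w - bw)]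

theorem draw_rectangle_eq_alt (width height border_width border_color fill_color : Int) :
    draw_rectangle width height border_width border_color fill_color
      = draw_rectangle_alt width height border_width border_color fill_color := by
  rw [A_canon]
  unfold draw_rectangle_alt
  simp only []
  by_cases hh : max height 0 = 0
  · rw [if_pos hh]
    have h0 : height.toNat = 0 := by omega
    simp [h0]
  · rw [if_neg hh]
    apply List.ext_getElem
    · simp; omega
    · intro i hi1 hi2
      simp only [List.getElem_map, List.getElem_range, List.getElem_append,
        List.length_replicate, List.length_append, List.getElem_replicate]
      have hih : i < height.toNat := by simpa using hi1
      split_ifs <;>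
        first
        | (exfalso; omega)
        | (rw [row_border])
        | (rw [row_interior_wide _ _ border_color fill_color (by omega)])
        | (rw [row_interior_narrow _ _ border_color fill_color (by omega)])

-- ===== VERDICT (by name: the statement is the Claim_ definition above) =====
theorem draw_rectangle_spec : Claim_equal_draw_rectangle := by
  intro width height border_width border_color fill_color _
  unfold Spec_draw_rectangle
  exact draw_rectangle_eq_alt width height border_width border_color fill_color
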